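-- pv_equiv track=rewrite | github.com/MaxDatex/CVTailor | models/input_cv_fields.py | validate_highlights_list
-- ===== SOURCE A (Python) =====
-- from typing import List, Literal, Optional, Union
--
-- def validate_highlights_list(highlights: List[str]) -> List[str]:
--     """
--     Validates a list of highlights for count, and individual length.
--     """
--     if not highlights:
--         return []
--     if len(highlights) > 10:
--         raise ValueError("Maximum 10 highlights allowed")
--     if any(len(highlight) < 10 for highlight in highlights):
--         raise ValueError("Each highlight must be more than 10 characters")
--     if any(len(highlight) > 200 for highlight in highlights):
--         raise ValueError("Each highlight must be less than 200 characters")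
--     return highlights
-- ===== SOURCE B (Python) =====
-- def validate_highlights_list(highlights):
--     if not highlights:
--         return []
--     if len(highlights) > 10:
--         raise ValueError("Maximum 10 highlights allowed")
--     lens = sorted(len(h) for h in highlights)
--     if lens[0] < 10:
--         raise ValueError("Each highlight must be more than 10 characters")
--     if lens[-1] > 200:
--         raise ValueError("Each highlight must be less than 200 characters")
--     return highlights
-- ===== Notes on version B (the rewrite author's own statement) =====
-- stated objective: alternative
-- what changed: B sorts the list of highlight lengths once and inspects only the two extremes (lens[0] for the too-short check, lens[-1] for the too-long check) instead of A's two full any(...) existence scans; checking the shortest first preserves A's exception priority.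
import Mathlib
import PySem

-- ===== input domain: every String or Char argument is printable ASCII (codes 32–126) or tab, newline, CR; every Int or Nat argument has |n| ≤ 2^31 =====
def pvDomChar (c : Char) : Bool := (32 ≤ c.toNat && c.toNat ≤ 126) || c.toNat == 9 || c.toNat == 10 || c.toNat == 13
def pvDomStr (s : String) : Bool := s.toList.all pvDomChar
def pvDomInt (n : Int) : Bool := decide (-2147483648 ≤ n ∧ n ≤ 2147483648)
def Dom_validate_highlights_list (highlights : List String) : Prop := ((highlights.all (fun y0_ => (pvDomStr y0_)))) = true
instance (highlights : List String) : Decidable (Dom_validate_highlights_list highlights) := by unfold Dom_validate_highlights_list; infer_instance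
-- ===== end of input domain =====

-- B sorts the highlight lengths once and inspects only the extremes lens[0] / lens[-1] instead of
-- A's two any(...) scans (alternative algorithm, same return value); equivalence is about the
-- RETURN value on inputs where A raises no ValueError (see Pre_).

-- ===== PORT A =====
-- raise branches return [] ; such inputs are excluded by Pre_validate_highlights_list
def validate_highlights_list (highlights : List String) : List String :=
  if highlights = [] then []
  else if (highlights.length : Int) > 10 then []  -- raise ValueError("Maximum 10 highlights allowed")
  else if highlights.any (fun h => PySem.Str.len h < 10) then []  -- raise ValueError
  else if highlights.any (fun h => PySem.Str.len h > 200) then []  -- raise ValueError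
  else highlights

-- ===== PORT B =====
def validate_highlights_list_alt (highlights : List String) : List String :=
  if highlights = [] then []
  else if (highlights.length : Int) > 10 then []  -- raise ValueError
  else
    let lens := PySem.List.sorted (highlights.map PySem.Str.len) (fun x => x) false
    match PySem.List.pyGet? lens 0 with     -- lens[0]; none = IndexError, unreachable (lens ≠ [])
    | none => []
    | some first =>
      if first < 10 then []  -- raise ValueError (too short)
      else
        match PySem.List.pyGet? lens (-1) with   -- lens[-1]
        | none => []
        | some last =>
          if last > 200 then []  -- raise ValueError (too long)
          else highlights

-- ===== PRECONDITION & SPEC =====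
-- Pre_ excludes exactly the inputs on which A raises ValueError: more than 10 highlights,
-- or some highlight shorter than 10 or longer than 200 characters.
def Pre_validate_highlights_list (highlights : List String) : Prop :=
  highlights = [] ∨
    ((highlights.length : Int) ≤ 10 ∧
      ∀ h ∈ highlights, 10 ≤ PySem.Str.len h ∧ PySem.Str.len h ≤ 200)
instance (highlights : List String) : Decidable (Pre_validate_highlights_list highlights) := by
  unfold Pre_validate_highlights_list; infer_instance

def pvWitness_validate_highlights_list : List String := ["abcdefghij", "hello world!"]

def Spec_validate_highlights_list (highlights : List String) (out : List String) : Prop := out = validate_highlights_list_alt highlights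
instance (highlights : List String) (out : List String) : Decidable (Spec_validate_highlights_list highlights out) := by unfold Spec_validate_highlights_list; infer_instance

-- ===== CLAIM (what is proved, stated in full; the proofs are below) =====
def Claim_equal_validate_highlights_list : Prop := ∀ (highlights : List String), Dom_validate_highlights_list highlights → Pre_validate_highlights_list highlights → Spec_validate_highlights_list highlights (validate_highlights_list highlights)

-- ===== LEMMAS AND PROOFS =====

-- any element of the sorted lengths list is the length of some highlight
theorem pv_mem_lens (highlights : List String) (x : Int)
    (hx : x ∈ PySem.List.sorted (highlights.map PySem.Str.len) (fun x => x) false) :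
    ∃ h ∈ highlights, PySem.Str.len h = x := by
  rw [PySem.List.mem_sorted] at hx
  simpa using hx

-- ===== VERDICT (by name: the statement is the Claim_ definition above) =====
theorem validate_highlights_list_spec : Claim_equal_validate_highlights_list := by
  intro highlights _ hpre
  unfold Spec_validate_highlights_list validate_highlights_list validate_highlights_list_alt
  by_cases hnil : highlights = []
  · subst hnil; rfl
  rcases hpre with rfl | ⟨hlen, hall⟩
  · exact absurd rfl hnil
  have hbound : ∀ x ∈ PySem.List.sorted (highlights.map PySem.Str.len) (fun x => x) false,
      10 ≤ x ∧ x ≤ 200 := by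
    intro x hx
    obtain ⟨h, hh, rfl⟩ := pv_mem_lens highlights x hx
    exact hall h hh
  have hslen : (PySem.List.sorted (highlights.map PySem.Str.len) (fun x => x) false).length
      = highlights.length := by
    rw [PySem.List.length_sorted, List.length_map]
  have hpos : 1 ≤ highlights.length := by
    cases highlights with
    | nil => exact absurd rfl hnil
    | cons a t => simp
  have hshort : highlights.any (fun h => PySem.Str.len h < 10) = false := by
    simp only [List.any_eq_false, decide_eq_true_eq]
    intro s hs; have := hall s hs; omega
  have hlong : highlights.any (fun h => PySem.Str.len h > 200) = false := by
    simp only [List.any_eq_false, decide_eq_true_eq]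
    intro s hs; have := hall s hs; omega
  rw [if_neg hnil, if_neg hnil,
    if_neg (show ¬((highlights.length : Int) > 10) from by omega)]
  simp only [hshort, hlong, Bool.false_eq_true, if_false]
  cases hfirst : PySem.List.pyGet? (PySem.List.sorted (highlights.map PySem.Str.len) (fun x => x) false) 0 with
  | none =>
    rw [PySem.List.pyGet?_eq_none_iff] at hfirst
    exact absurd (by constructor <;> omega : PySem.Raise.InRange (PySem.List.sorted (highlights.map PySem.Str.len) (fun x => x) false).length 0) hfirst
  | some first =>
    have hf := hbound first (PySem.List.mem_of_pyGet?_eq_some _ hfirst)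
    cases hlast : PySem.List.pyGet? (PySem.List.sorted (highlights.map PySem.Str.len) (fun x => x) false) (-1) with
    | none =>
      rw [PySem.List.pyGet?_eq_none_iff] at hlast
      exact absurd (by constructor <;> omega : PySem.Raise.InRange (PySem.List.sorted (highlights.map PySem.Str.len) (fun x => x) false).length (-1)) hlast
    | some last =>
      have hl := hbound last (PySem.List.mem_of_pyGet?_eq_some _ hlast)
      show highlights = if (highlights.length : Int) > 10 then []
        else if first < 10 then [] else if last > 200 then [] else highlights
      rw [if_neg (by omega), if_neg (by omega), if_neg (by omega)]
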